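-- pv_equiv track=rewrite | github.com/fullscreen-triangle/borgia | dmitri/publications/atomic-derivation/validate_spectroscopic_derivation.py | _slater_groups
-- ===== SOURCE A (Python) =====
-- _L_LETTER = {0: "s", 1: "p", 2: "d", 3: "f"}
--
-- def _slater_group_sort_key(label: str) -> tuple[int, int]:
--     """Return a sort key so Slater groups are in the correct inner-to-outer
--     ordering: 1s | 2sp | 3sp | 3d | 4sp | 4d | 4f | 5sp | 5d | 5f | 6sp ...
--
--     For sp groups like '3sp': key = (3, 1)   (n, 1)
--     For d  groups like '3d' : key = (3, 2)   (n, 2)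
--     For f  groups like '4f' : key = (4, 3)   (n, 3)
--
--     Since d and f of shell n are inner to sp of shell n+1, and
--     (n, 2) < (n+1, 1) and (n, 3) < (n+1, 1), this gives correct ordering.
--     Actually (3,2) vs (4,1): 3 < 4 so 3d < 4sp. Correct.
--     And within same n: (4,1) for 4sp vs (4,2) for 4d vs (4,3) for 4f.
--     We want 4sp < 4d < 4f. With keys (4,1) < (4,2) < (4,3). Correct.
--     But wait -- Slater ordering is: ... 3sp | 3d | 4sp | 4d | 4f | 5sp ...
--     With our keys: 3sp=(3,1), 3d=(3,2), 4sp=(4,1), 4d=(4,2), 4f=(4,3), 5sp=(5,1)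
--     Sort: (3,1) < (3,2) < (4,1) < (4,2) < (4,3) < (5,1). Correct.
--     """
--     n = int(label[0])
--     if label.endswith("sp"):
--         return (n, 1)
--     elif label.endswith("d"):
--         return (n, 2)
--     elif label.endswith("f"):
--         return (n, 3)
--     else:
--         return (n, 0)
--
-- def _slater_groups(
--     config: list[tuple[int, int, int]],
-- ) -> list[tuple[str, int, list[tuple[int, int, int]]]]:
--     """Partition electrons into Slater groups in correct ordering.
--
--     Slater groups (innermost to outermost):
--       1s | 2s,2p | 3s,3p | 3d | 4s,4p | 4d | 4f | 5s,5p | ...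
--
--     Returns list of (group_label, group_index, [(n,l,occ)...])
--     sorted by Slater group priority.
--     """
--     group_map: dict[str, list[tuple[int, int, int]]] = {}
--
--     for n, l, occ in config:
--         if l <= 1:
--             label = f"{n}sp"
--         else:
--             label = f"{n}{_L_LETTER[l]}"
--
--         if label not in group_map:
--             group_map[label] = []
--         group_map[label].append((n, l, occ))
--
--     # Sort groups by Slater priority
--     sorted_labels = sorted(group_map.keys(), key=_slater_group_sort_key)
--     groups: list[tuple[str, int, list[tuple[int, int, int]]]] = []
--     for idx, label in enumerate(sorted_labels):
--         groups.append((label, idx, group_map[label]))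
--
--     return groups
-- ===== SOURCE B (Python) =====
-- _L_LETTER = {0: "s", 1: "p", 2: "d", 3: "f"}
--
--
-- def _slater_group_sort_key(label):
--     n = int(label[0])
--     if label.endswith("sp"):
--         return (n, 1)
--     elif label.endswith("d"):
--         return (n, 2)
--     elif label.endswith("f"):
--         return (n, 3)
--     else:
--         return (n, 0)
--
--
-- def _slater_groups(config):
--     def label_of(n, l):
--         return f"{n}sp" if l <= 1 else f"{n}{_L_LETTER[l]}"
--
--     labels = []
--     for n, l, occ in config:
--         lab = label_of(n, l)
--         if lab not in labels:
--             labels.append(lab)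
--     labels.sort(key=_slater_group_sort_key)
--     return [(lab, idx, [e for e in config if label_of(e[0], e[1]) == lab])
--             for idx, lab in enumerate(labels)]
-- ===== Notes on version B (the rewrite author's own statement) =====
-- stated objective: simpler
-- what changed: B drops the dict-of-lists accumulator: it dedups the label sequence (first occurrences), sorts that label list with the same Slater key, and builds each group's members by filtering the input per label in a comprehension.
import Mathlib
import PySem

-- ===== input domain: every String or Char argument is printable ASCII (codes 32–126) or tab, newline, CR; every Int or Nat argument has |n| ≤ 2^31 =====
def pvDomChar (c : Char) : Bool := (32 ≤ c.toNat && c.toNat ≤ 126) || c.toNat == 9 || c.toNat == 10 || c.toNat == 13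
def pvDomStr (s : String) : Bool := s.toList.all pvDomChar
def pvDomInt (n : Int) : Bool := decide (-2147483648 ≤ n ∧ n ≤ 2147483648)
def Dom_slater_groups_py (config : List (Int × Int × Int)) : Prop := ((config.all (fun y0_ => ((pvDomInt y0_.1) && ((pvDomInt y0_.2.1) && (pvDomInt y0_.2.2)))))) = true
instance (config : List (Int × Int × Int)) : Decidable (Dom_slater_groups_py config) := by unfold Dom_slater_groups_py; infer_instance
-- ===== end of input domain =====

-- B is a simpler decomposition (dedup labels + per-label filter instead of a dict of lists); same value everywhere A returns.

-- ===== PORT A =====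
-- _L_LETTER = {0: "s", 1: "p", 2: "d", 3: "f"}
def pvLLetter : PySem.Dict Int String := PySem.Dict.ofList [(0, "s"), (1, "p"), (2, "d"), (3, "f")]

-- the label both Pythons compute for an entry (f"{n}sp" / f"{n}{_L_LETTER[l]}"); _L_LETTER[l] raises
-- KeyError for l ∉ {2,3} in the else branch — excluded by Pre_, here getD "".
def pvLabel (n l : Int) : String :=
  if l ≤ 1 then PySem.Int.toStr n ++ "sp"
  else PySem.Int.toStr n ++ ((pvLLetter.get? l).getD "")

-- _slater_group_sort_key (shared helper of both Pythons); int(label[0]) raises ValueError when the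
-- first char is not a digit (n < 0) — excluded by Pre_, here getD 0.
def pvSortKey (label : String) : Int × Int :=
  let n : Int := (((PySem.Str.pyGet? label 0).map (fun c => String.ofList [c])).bind PySem.Int.ofStr?).getD 0
  if PySem.Str.endswith label "sp" then (n, 1)
  else if PySem.Str.endswith label "d" then (n, 2)
  else if PySem.Str.endswith label "f" then (n, 3)
  else (n, 0)

def slater_groups_py (config : List (Int × Int × Int)) : List (String × Int × (List (Int × Int × Int))) :=
  let group_map : PySem.Dict String (List (Int × Int × Int)) :=
    config.foldl (fun d e =>
      let label := pvLabel e.1 e.2.1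
      let d := if d.contains label then d else d.insert label []
      d.modify label [] (fun xs => xs ++ [e])) PySem.Dict.empty
  let sorted_labels := PySem.List.sorted2 group_map.keys (fun lab => (pvSortKey lab).1) (fun lab => (pvSortKey lab).2)
  (PySem.List.enumerate sorted_labels).foldl
    (fun groups p => groups ++ [(p.2, p.1, group_map.getD p.2 [])]) []

-- ===== PORT B =====
def slater_groups_py_alt (config : List (Int × Int × Int)) : List (String × Int × (List (Int × Int × Int))) :=
  let labels := PySem.List.dedup (config.map (fun e => pvLabel e.1 e.2.1))
  let sorted_labels := PySem.List.sorted2 labels (fun lab => (pvSortKey lab).1) (fun lab => (pvSortKey lab).2)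
  (PySem.List.enumerate sorted_labels).map
    (fun p => (p.2, p.1, config.filter (fun e => pvLabel e.1 e.2.1 == p.2)))

-- ===== PRECONDITION & SPEC =====
-- Pre_ excludes exactly the inputs where A raises: n < 0 (ValueError from int(label[0]) = int('-'))
-- or l ≥ 4 (KeyError from _L_LETTER[l]).
def Pre_slater_groups_py (config : List (Int × Int × Int)) : Prop :=
  ∀ e ∈ config, 0 ≤ e.1 ∧ e.2.1 ≤ 3
instance (config : List (Int × Int × Int)) : Decidable (Pre_slater_groups_py config) := by unfold Pre_slater_groups_py; infer_instance

def pvWitness_slater_groups_py : (List (Int × Int × Int)) := [(1, 0, 2), (2, 0, 2), (2, 1, 6), (3, 2, 5)]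

def Spec_slater_groups_py (config : List (Int × Int × Int)) (out : List (String × Int × (List (Int × Int × Int)))) : Prop := out = slater_groups_py_alt config
instance (config : List (Int × Int × Int)) (out : List (String × Int × (List (Int × Int × Int)))) : Decidable (Spec_slater_groups_py config out) := by unfold Spec_slater_groups_py; infer_instance

-- ===== CLAIM (what is proved, stated in full; the proofs are below) =====
def Claim_equal_slater_groups_py : Prop := ∀ (config : List (Int × Int × Int)), Dom_slater_groups_py config → Pre_slater_groups_py config → Spec_slater_groups_py config (slater_groups_py config)

-- ===== LEMMAS AND PROOFS =====

-- A's loop body (insert-if-absent then append) is one dict modify.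
theorem pv_step (d : PySem.Dict String (List (Int × Int × Int))) (e : Int × Int × Int) :
    (let label := pvLabel e.1 e.2.1
     let d' := if d.contains label then d else d.insert label []
     d'.modify label [] (fun xs => xs ++ [e]))
    = d.modify (pvLabel e.1 e.2.1) [] (fun xs => xs ++ [e]) := by
  by_cases h : d.contains (pvLabel e.1 e.2.1)
  · simp [h]
  · have h' : d.contains (pvLabel e.1 e.2.1) = false := by simpa using h
    simp [h', PySem.Dict.modify, PySem.Dict.getD_insert_self,
      PySem.Dict.insert_insert_self, PySem.Dict.getD_of_not_contains]

-- the dict built by A, as a modify-only fold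
theorem pv_gm_eq (config : List (Int × Int × Int)) :
    config.foldl (fun d e =>
      let label := pvLabel e.1 e.2.1
      let d := if d.contains label then d else d.insert label []
      d.modify label [] (fun xs => xs ++ [e])) PySem.Dict.empty
    = config.foldl (fun d e => d.modify (pvLabel e.1 e.2.1) [] (fun xs => xs ++ [e])) PySem.Dict.empty := by
  exact List.foldl_ext _ _ _ (fun d e _ => pv_step d e)

theorem pv_keys (config : List (Int × Int × Int)) :
    (config.foldl (fun d e => d.modify (pvLabel e.1 e.2.1) [] (fun xs => xs ++ [e]))
        (PySem.Dict.empty : PySem.Dict String (List (Int × Int × Int)))).keys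
    = PySem.List.dedup (config.map (fun e => pvLabel e.1 e.2.1)) := by
  rw [PySem.Dict.keys_foldl_modify_key config (fun e => pvLabel e.1 e.2.1) [] (fun _ e xs => xs ++ [e])]
  simp [PySem.Dict.keys_empty, PySem.List.dedup_eq_ofList, PySem.Set.ofList, PySem.Set.update]

theorem pv_getD (config : List (Int × Int × Int)) (c : String) :
    (config.foldl (fun d e => d.modify (pvLabel e.1 e.2.1) [] (fun xs => xs ++ [e]))
        (PySem.Dict.empty : PySem.Dict String (List (Int × Int × Int)))).getD c []
    = config.filter (fun e => pvLabel e.1 e.2.1 == c) := by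
  have h := PySem.Dict.getD_foldl_modify_append
      (config.map (fun e => (pvLabel e.1 e.2.1, e)))
      (PySem.Dict.empty : PySem.Dict String (List (Int × Int × Int))) c
  rw [List.foldl_map] at h
  simpa [List.filter_map, Function.comp_def] using h

-- ===== VERDICT (by name: the statement is the Claim_ definition above) =====
theorem slater_groups_py_spec : Claim_equal_slater_groups_py := by
  intro config _ _
  unfold Spec_slater_groups_py slater_groups_py slater_groups_py_alt
  simp only [pv_gm_eq, pv_keys, pv_getD, PySem.List.foldl_append_singleton_eq_map, List.nil_append]
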